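-- pv_equiv track=rewrite | github.com/deepnimma/NottAnotherMasterSetTrackerBackend | downloader/src/set.py | build_set_query
-- ===== SOURCE A (Python) =====
-- def build_set_query(table_name: str, sets: list[str]) -> tuple[str, list[str]]:
--     base_query = f"SELECT * FROM {table_name} WHERE"
--
--     new_sets = [sanitize_set_name(set) for set in sets]
--     query_strs = [base_query]
--     params = []
--
--     for i, name in enumerate(new_sets):
--         new_str = "OR " if i > 0 else ""
--         new_str += f"setName LIKE ?"
--         params.append(f"{name}")
--         query_strs.append(new_str)
--
--     # Add ordering string
--     query_strs.append("ORDER BY releaseDate ASC, cardNumber ASC;")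
--
--     joined_query = " ".join(query_strs)
--
--     return joined_query, params
--
-- def sanitize_set_name(set_name: str) -> str:
--     set_name = set_name.lower()
--     set_name = set_name.replace(" ", "-")
--
--     return set_name
-- ===== SOURCE B (Python) =====
-- def sanitize_set_name(set_name: str) -> str:
--     return set_name.lower().replace(" ", "-")
--
--
-- def build_set_query(table_name: str, sets: list[str]) -> tuple[str, list[str]]:
--     # The query text depends only on len(sets): the WHERE body is a closed-form
--     # string repetition instead of a per-element loop.
--     n = len(sets)
--     body = "setName LIKE ?" + " OR setName LIKE ?" * (n - 1) + " " if n else ""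
--     query = f"SELECT * FROM {table_name} WHERE " + body + "ORDER BY releaseDate ASC, cardNumber ASC;"
--     return query, [sanitize_set_name(s) for s in sets]
-- ===== Notes on version B (the rewrite author's own statement) =====
-- stated objective: simpler
-- what changed: B drops A's enumerate loop that accumulates query pieces and params in parallel with a per-index 'OR ' prefix, and instead computes the WHERE body in closed form from len(sets) alone by string repetition ('setName LIKE ?' + ' OR setName LIKE ?' * (n-1)), with params a separate comprehension.
import Mathlib
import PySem

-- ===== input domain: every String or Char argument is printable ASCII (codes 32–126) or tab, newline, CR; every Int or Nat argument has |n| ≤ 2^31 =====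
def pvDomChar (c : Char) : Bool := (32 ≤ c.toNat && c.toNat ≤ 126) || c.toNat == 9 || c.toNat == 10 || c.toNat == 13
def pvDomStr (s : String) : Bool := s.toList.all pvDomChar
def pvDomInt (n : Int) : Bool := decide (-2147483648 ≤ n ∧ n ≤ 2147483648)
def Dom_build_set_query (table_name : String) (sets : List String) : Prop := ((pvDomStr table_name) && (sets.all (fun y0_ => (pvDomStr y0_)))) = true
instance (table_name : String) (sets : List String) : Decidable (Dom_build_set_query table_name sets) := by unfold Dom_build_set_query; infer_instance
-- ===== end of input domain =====

-- B replaces A's per-element accumulator loop by a closed-form string repetition keyed on len(sets) (objective: simpler).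

-- ===== PORT A =====
def sanitize_set_name (set_name : String) : String :=
  let set_name := PySem.Str.lower set_name
  let set_name := PySem.Str.replace set_name " " "-"
  set_name

-- loop body of A's for-loop (state = (query_strs, params), element = (i, name))
def bsqStep (st : List String × List String) (p : Int × String) : List String × List String :=
  let new_str := PySem.Str.join "" [(if p.1 > 0 then "OR " else ""), "setName LIKE ?"]
  (st.1 ++ [new_str], st.2 ++ [p.2])

def build_set_query (table_name : String) (sets : List String) : String × List String :=
  let base_query := PySem.Str.join "" ["SELECT * FROM ", table_name, " WHERE"]
  let new_sets := sets.map (fun s => sanitize_set_name s)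
  let st := (PySem.List.enumerate new_sets).foldl bsqStep ([base_query], [])
  let query_strs := st.1 ++ ["ORDER BY releaseDate ASC, cardNumber ASC;"]
  (PySem.Str.join " " query_strs, st.2)

-- ===== PORT B =====
def sanitize_set_name_alt (set_name : String) : String :=
  PySem.Str.replace (PySem.Str.lower set_name) " " "-"

def build_set_query_alt (table_name : String) (sets : List String) : String × List String :=
  let n : Int := sets.length
  -- '" OR setName LIKE ?" * (n - 1)' ported via PySem.List.pyRepeat on the code points (exact)
  let body : String :=
    if n ≠ 0 then
      PySem.Str.join "" ["setName LIKE ?",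
        String.ofList (PySem.List.pyRepeat " OR setName LIKE ?".toList (n - 1)), " "]
    else ""
  let query := PySem.Str.join ""
    ["SELECT * FROM ", table_name, " WHERE ", body, "ORDER BY releaseDate ASC, cardNumber ASC;"]
  (query, sets.map (fun s => sanitize_set_name_alt s))

-- ===== PRECONDITION & SPEC =====
def Spec_build_set_query (table_name : String) (sets : List String) (out : String × List String) : Prop := out = build_set_query_alt table_name sets
instance (table_name : String) (sets : List String) (out : String × List String) : Decidable (Spec_build_set_query table_name sets out) := by unfold Spec_build_set_query; infer_instance

-- ===== CLAIM (what is proved, stated in full; the proofs are below) =====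
def Claim_equal_build_set_query : Prop := ∀ (table_name : String) (sets : List String), Dom_build_set_query table_name sets → Spec_build_set_query table_name sets (build_set_query table_name sets)

-- ===== LEMMAS AND PROOFS =====

-- closed form of A's loop once the index is positive
theorem bsq_loop_tail (l : List String) (qs ps : List String) (s : Int) (hs : 1 ≤ s) :
    (PySem.List.enumerate l s).foldl bsqStep (qs, ps)
      = (qs ++ l.map (fun _ => "OR setName LIKE ?"), ps ++ l) := by
  induction l generalizing qs ps s with
  | nil => simp [PySem.List.enumerate_nil]
  | cons x xs ih =>
      rw [PySem.List.enumerate_cons, List.foldl_cons]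
      have hpos : s > 0 := by omega
      have : bsqStep (qs, ps) (s, x) = (qs ++ ["OR setName LIKE ?"], ps ++ [x]) := by
        simp [bsqStep, hpos]; decide
      rw [this, ih _ _ (s + 1) (by omega)]
      simp

-- a sep-join is: the head piece, then each later piece prefixed with sep, flattened
theorem join_head_flatten (sep : List Char) (l : List (List Char)) (x : List Char) :
    PySem.Chars.join sep (x :: l) = x ++ (l.map (fun y => sep ++ y)).flatten := by
  induction l generalizing x with
  | nil => simp [PySem.Chars.join_singleton]
  | cons y t ih =>
      rw [PySem.Chars.join_cons_cons, ih y]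
      simp

-- ===== VERDICT (by name: the statement is the Claim_ definition above) =====
theorem build_set_query_spec : Claim_equal_build_set_query := by
  intro table_name sets _
  unfold Spec_build_set_query
  cases sets with
  | nil =>
      simp only [build_set_query, build_set_query_alt, List.map_nil, List.length_nil,
        PySem.List.enumerate_nil, List.foldl_nil, Nat.cast_zero, ne_eq, not_true_eq_false,
        if_false, Prod.mk.injEq, and_true]
      apply String.toList_inj.mp
      simp [PySem.Str.toList_join, join_head_flatten]
  | cons x xs =>
      simp only [build_set_query, build_set_query_alt, List.map_cons,
        PySem.List.enumerate_cons, List.foldl_cons]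
      have hstep : bsqStep ([PySem.Str.join "" ["SELECT * FROM ", table_name, " WHERE"]], [])
            (0, sanitize_set_name x)
          = ([PySem.Str.join "" ["SELECT * FROM ", table_name, " WHERE"], "setName LIKE ?"],
             [sanitize_set_name x]) := by
        simp only [bsqStep]
        norm_num
        decide
      rw [hstep, show (0:Int) + 1 = 1 from rfl, bsq_loop_tail _ _ _ 1 (by omega)]
      simp only [List.map_map, Function.comp_def, List.map_const']
      refine Prod.ext ?_ ?_
      · apply String.toList_inj.mp
        simp only [PySem.Str.toList_join, List.map_cons, List.map_append, List.map_nil,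
          List.map_replicate, List.cons_append, List.nil_append]
        simp only [List.length_cons]
        rw [if_pos (show (((xs.length + 1 : Nat) : Int) ≠ 0) by push_cast; omega)]
        rw [show (((xs.length + 1 : Nat) : Int) - 1) = (xs.length : Int) from by push_cast; ring]
        simp [join_head_flatten, PySem.List.pyRepeat, PySem.Str.toList_join, String.toList_ofList]
      · simp [sanitize_set_name, sanitize_set_name_alt]
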